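-- pv_equiv track=rewrite | github.com/lawos98/ASD | greedy_algorithms/Tank_min_costs.py | tank
-- ===== SOURCE A (Python) =====
-- from math import inf
--
-- def tank(Array,K):
-- 	def find_min(Array,index,fueal):
-- 		min_index=inf
-- 		for i in range(index,index+fueal+1):
-- 			if Array[i]!=0:
-- 				min_index=i
-- 		if min_index==inf:return -1
-- 		for i in range(index,index+fueal+1):
-- 			if Array[i]<=Array[min_index] and Array[i]>0:
-- 				min_index=i
-- 		return min_index
--
-- 	lenght=len(Array)
-- 	index=0
-- 	costs=0
-- 	fueal=0
-- 	if Array[index]>0: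
-- 		costs+=Array[index]
-- 		fueal=1
-- 	else:
-- 		return -1
-- 	while index!=lenght-1 and fueal!=0:
-- 		if index+fueal>=lenght-1:
-- 			fueal-=lenght-1-index
-- 			index=lenght-1
-- 			break
-- 		if fueal==K:
-- 			index_to_go=find_min(Array,index+1,fueal-1)
-- 			if index_to_go==-1:
-- 				return -1
-- 		else:
-- 			index_to_go=find_min(Array,index,fueal)
-- 		costs+=Array[index_to_go]
-- 		fueal-=index_to_go-index
-- 		fueal+=1
-- 		index=index_to_go
-- 	return costs
-- ===== SOURCE B (Python) =====
-- def tank(Array, K):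
--     n = len(Array)
--     if Array[0] <= 0:
--         return -1
--
--     # prev[i] = largest j <= i with Array[j] != 0 (or -1 if none)
--     prev = []
--     last = -1
--     for i in range(n):
--         if Array[i] != 0:
--             last = i
--         prev.append(last)
--
--     # rank stations: positively-priced ones by (price, rightmost first), all others after
--     def key(i):
--         return (0, Array[i], -i) if Array[i] > 0 else (1, 0, -i)
--
--     def better(x, y):
--         return x if key(x) <= key(y) else y
--
--     # sparse table: rows[j][i] = best-ranked station index in Array[i : i + 2**j]
--     rows = [list(range(n))]
--     size = 1
--     while 2 * size <= n:
--         r = rows[-1]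
--         rows.append([better(r[i], r[i + size]) for i in range(n - 2 * size + 1)])
--         size *= 2
--
--     def cheapest(lo, hi):
--         k = (hi - lo + 1).bit_length() - 1
--         return better(rows[k][lo], rows[k][hi - (1 << k) + 1])
--
--     def pick(lo, hi):
--         # the stop chosen in the reachable stretch Array[lo..hi]:
--         # no usable (nonzero) station -> -1; last usable one pays (negative) -> take it;
--         # otherwise the cheapest positively-priced station, the rightmost on ties
--         L = prev[hi]
--         if L < lo:
--             return -1
--         return L if Array[L] < 0 else cheapest(lo, hi)
--
--     costs = Array[0]
--     index, fuel = 0, 1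
--     while index != n - 1 and index + fuel < n - 1:
--         lo = index + 1 if fuel == K else index
--         j = pick(lo, index + fuel)
--         if j == -1:
--             return -1
--         costs += Array[j]
--         fuel += 1 - (j - index)
--         index = j
--     return costs
-- ===== Notes on version B (the rewrite author's own statement) =====
-- stated objective: alternative
-- what changed: The per-step linear window scans (find_min) are replaced by O(1) queries against precomputed structures: a prefix array of last-nonzero indices and a sparse-table RMQ over a lexicographic (positive-price, rightmost-index) ranking, so each greedy step is a table lookup after O(n log n) preprocessing instead of a rescan.
import Mathlib
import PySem

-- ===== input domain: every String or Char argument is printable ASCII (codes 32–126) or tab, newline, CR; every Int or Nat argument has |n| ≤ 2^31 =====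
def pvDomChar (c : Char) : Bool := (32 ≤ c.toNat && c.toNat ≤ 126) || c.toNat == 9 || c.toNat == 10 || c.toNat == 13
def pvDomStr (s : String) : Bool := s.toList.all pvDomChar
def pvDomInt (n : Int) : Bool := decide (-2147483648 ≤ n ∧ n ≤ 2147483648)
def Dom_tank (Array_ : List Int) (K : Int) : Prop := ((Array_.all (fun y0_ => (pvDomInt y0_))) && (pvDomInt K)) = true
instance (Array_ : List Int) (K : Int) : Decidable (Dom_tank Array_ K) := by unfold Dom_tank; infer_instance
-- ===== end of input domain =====

-- B replaces A's per-step window rescans (find_min) by table lookups against structures built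
-- once up front: a prefix array of last-nonzero indices and a sparse table indexed by a
-- lexicographic (positive-price, rightmost-index) ranking. Objective: alternative.

-- ===== PORT A =====
-- Array[i]; every access is in range on the admitted inputs (see the loop guards)
def tkGet (a : List Int) (i : Int) : Int := PySem.List.pyGetD a i 0

-- first loop of find_min: min_index = inf (none); last i in window with Array[i] != 0
def tkStep1 (a : List Int) (m : Option Int) (i : Int) : Option Int :=
  if tkGet a i ≠ 0 then some i else m

-- second loop of find_min
def tkStep2 (a : List Int) (m i : Int) : Int :=
  if tkGet a i ≤ tkGet a m ∧ tkGet a i > 0 then i else m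

def findMin (a : List Int) (index fueal : Int) : Int :=
  let w := PySem.List.pyRange index (index + fueal + 1) 1
  match w.foldl (tkStep1 a) none with
  | none => -1
  | some m0 => w.foldl (tkStep2 a) m0

-- the while loop of A (state: index, costs, fueal); the assignments before `break` are dead
def tankLoop (a : List Int) (K n index costs fueal : Int) : Int :=
  if _h1 : index ≠ n - 1 ∧ fueal ≠ 0 then
    if _h2 : index + fueal ≥ n - 1 then costs
    else
      if fueal = K then
        let j := findMin a (index + 1) (fueal - 1)
        if j = -1 then -1
        else tankLoop a K n j (costs + tkGet a j) (fueal - (j - index) + 1)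
      else
        let j := findMin a index fueal
        tankLoop a K n j (costs + tkGet a j) (fueal - (j - index) + 1)
  else costs
termination_by (n - 1 - index - fueal).toNat
decreasing_by all_goals omega

def tank (Array_ : List Int) (K : Int) : Int :=
  let n : Int := Array_.length
  if tkGet Array_ 0 > 0 then tankLoop Array_ K n 0 (tkGet Array_ 0) 1
  else -1

-- ===== PORT B =====
-- key(i): positively-priced stations rank by (price, rightmost first), all others after
def tbKey (a : List Int) (i : Int) : Int × Int × Int :=
  if tkGet a i > 0 then (0, tkGet a i, -i) else (1, 0, -i)

-- tuple `<=` (lexicographic, as Python compares the 3-tuples produced by key)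
def tbLe (p q : Int × Int × Int) : Bool :=
  p.1 < q.1 || (p.1 = q.1 && (p.2.1 < q.2.1 || (p.2.1 = q.2.1 && p.2.2 ≤ q.2.2)))

def tbBetter (a : List Int) (x y : Int) : Int :=
  if tbLe (tbKey a x) (tbKey a y) then x else y

-- the `for i in range(n)` loop building prev (prev[i] = largest j <= i with Array[j] != 0, or -1)
def tbPrevAux (a : List Int) (n i last : Int) (acc : List Int) : List Int :=
  if _h : i < n then
    let last' := if tkGet a i ≠ 0 then i else last
    tbPrevAux a n (i + 1) last' (acc ++ [last'])
  else acc
termination_by (n - i).toNat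
decreasing_by omega

def tbPrev (a : List Int) (n : Int) : List Int := tbPrevAux a n 0 (-1) []

-- the `while 2 * size <= n` loop building the sparse-table rows (1 ≤ size is a totality
-- guard for termination only: size starts at 1 and doubles)
def tbRowsAux (a : List Int) (n size : Int) (acc : List (List Int)) (cur : List Int) :
    List (List Int) :=
  if _h : 2 * size ≤ n ∧ 1 ≤ size then
    let nxt := (PySem.List.pyRange 0 (n - 2 * size + 1) 1).map
      (fun i => tbBetter a (PySem.List.pyGetD cur i 0) (PySem.List.pyGetD cur (i + size) 0))
    tbRowsAux a n (2 * size) (acc ++ [nxt]) nxt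
  else acc
termination_by (n - size).toNat
decreasing_by omega

def tbRows (a : List Int) (n : Int) : List (List Int) :=
  let row0 := PySem.List.pyRange 0 n 1
  tbRowsAux a n 1 [row0] row0

-- cheapest(lo, hi); (hi-lo+1).bit_length() - 1 on a positive length is Nat.log2
def tbCheapest (a : List Int) (rows : List (List Int)) (lo hi : Int) : Int :=
  let k : Nat := Nat.log2 (hi - lo + 1).toNat
  let row := PySem.List.pyGetD rows (k : Int) []
  tbBetter a (PySem.List.pyGetD row lo 0) (PySem.List.pyGetD row (hi - 2 ^ k + 1) 0)

def tbPick (a : List Int) (prev : List Int) (rows : List (List Int)) (lo hi : Int) : Int :=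
  let L := PySem.List.pyGetD prev hi 0
  if L < lo then -1
  else if tkGet a L < 0 then L
  else tbCheapest a rows lo hi

-- the while loop of B (state: index, costs, fuel)
def tankAltLoop (a : List Int) (prev : List Int) (rows : List (List Int))
    (K n index costs fuel : Int) : Int :=
  if _h : index ≠ n - 1 ∧ index + fuel < n - 1 then
    let lo := if fuel = K then index + 1 else index
    let j := tbPick a prev rows lo (index + fuel)
    if j = -1 then -1
    else tankAltLoop a prev rows K n j (costs + tkGet a j) (fuel + 1 - (j - index))
  else costs
termination_by (n - 1 - index - fuel).toNat
decreasing_by omega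

def tank_alt (Array_ : List Int) (K : Int) : Int :=
  let n : Int := Array_.length
  if tkGet Array_ 0 ≤ 0 then -1
  else tankAltLoop Array_ (tbPrev Array_ n) (tbRows Array_ n) K n 0 (tkGet Array_ 0) 1

-- ===== PRECONDITION & SPEC =====
-- Pre_ excludes only the empty list, on which Python A raises IndexError at Array[0].
def Pre_tank (Array_ : List Int) (K : Int) : Prop := Array_ ≠ []
instance (Array_ : List Int) (K : Int) : Decidable (Pre_tank Array_ K) := by unfold Pre_tank; infer_instance

def pvWitness_tank : List Int × Int := ([3, 1, 2], 2)

def Spec_tank (Array_ : List Int) (K : Int) (out : Int) : Prop := out = tank_alt Array_ K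
instance (Array_ : List Int) (K : Int) (out : Int) : Decidable (Spec_tank Array_ K out) := by unfold Spec_tank; infer_instance

-- ===== CLAIM (what is proved, stated in full; the proofs are below) =====
def Claim_equal_tank : Prop := ∀ (Array_ : List Int) (K : Int), Dom_tank Array_ K → Pre_tank Array_ K → Spec_tank Array_ K (tank Array_ K)

-- ===== LEMMAS AND PROOFS =====

-- `r is the best-ranked index of the window [lo, hi]`
def tkIsBest (a : List Int) (lo hi r : Int) : Prop :=
  lo ≤ r ∧ r ≤ hi ∧ ∀ j : Int, lo ≤ j → j ≤ hi → tbLe (tbKey a r) (tbKey a j) = true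

-- last nonzero index in Array[0..hi] as A's first pass computes it over [0, hi]
def tkLNZ (a : List Int) (hi : Int) : Option Int :=
  ((PySem.List.pyRange 0 (hi + 1) 1).filter (fun j => tkGet a j ≠ 0)).getLast?

-- `row` is a valid sparse-table row for window size s
def tkRowOk (a : List Int) (n s : Int) (row : List Int) : Prop :=
  ∀ i : Int, 0 ≤ i → i ≤ n - s → tkIsBest a i (i + s - 1) (PySem.List.pyGetD row i 0)

-- ---- order facts about tbLe / tbKey ----
theorem tbLe_refl (p : Int × Int × Int) : tbLe p p = true := by
  simp [tbLe]

theorem tbLe_trans {p q r : Int × Int × Int} (h1 : tbLe p q = true) (h2 : tbLe q r = true) :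
    tbLe p r = true := by
  obtain ⟨a1, a2, a3⟩ := p; obtain ⟨b1, b2, b3⟩ := q; obtain ⟨c1, c2, c3⟩ := r
  simp only [tbLe] at *
  simp only [Bool.or_eq_true, Bool.and_eq_true, decide_eq_true_eq] at *
  omega

theorem tbLe_total (p q : Int × Int × Int) : tbLe p q = true ∨ tbLe q p = true := by
  obtain ⟨a1, a2, a3⟩ := p; obtain ⟨b1, b2, b3⟩ := q
  simp only [tbLe]
  simp only [Bool.or_eq_true, Bool.and_eq_true, decide_eq_true_eq]
  omega

theorem tbLe_antisymm {p q : Int × Int × Int} (h1 : tbLe p q = true) (h2 : tbLe q p = true) :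
    p = q := by
  obtain ⟨a1, a2, a3⟩ := p; obtain ⟨b1, b2, b3⟩ := q
  simp only [tbLe] at *
  simp only [Bool.or_eq_true, Bool.and_eq_true, decide_eq_true_eq] at *
  simp only [Prod.mk.injEq]
  omega

theorem tkIsBest_unique {a : List Int} {lo hi r s : Int}
    (h1 : tkIsBest a lo hi r) (h2 : tkIsBest a lo hi s) : r = s := by
  obtain ⟨hr1, hr2, hr3⟩ := h1
  obtain ⟨hs1, hs2, hs3⟩ := h2
  have k1 := hr3 s hs1 hs2
  have k2 := hs3 r hr1 hr2
  have := tbLe_antisymm k1 k2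
  -- the third component of tbKey is -i in both branches
  have h3 : (tbKey a r).2.2 = (tbKey a s).2.2 := by rw [this]
  simp only [tbKey] at h3
  split_ifs at h3 <;> simp_all

theorem tbBetter_isBest {a : List Int} {lo hi lo2 hi1 x y : Int}
    (h1 : tkIsBest a lo hi1 x) (h2 : tkIsBest a lo2 hi y)
    (hcov : lo2 ≤ hi1 + 1) (hsub1 : lo ≤ lo2) (hsub2 : hi1 ≤ hi) :
    tkIsBest a lo hi (tbBetter a x y) := by
  obtain ⟨hx1, hx2, hx3⟩ := h1
  obtain ⟨hy1, hy2, hy3⟩ := h2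
  have hdom : ∀ j : Int, lo ≤ j → j ≤ hi →
      tbLe (tbKey a x) (tbKey a j) = true ∨ tbLe (tbKey a y) (tbKey a j) = true := by
    intro j hj1 hj2
    by_cases hc : j ≤ hi1
    · exact Or.inl (hx3 j hj1 hc)
    · exact Or.inr (hy3 j (by omega) hj2)
  unfold tbBetter
  by_cases hb : tbLe (tbKey a x) (tbKey a y) = true
  · rw [if_pos hb]
    refine ⟨hx1, by omega, ?_⟩
    intro j hj1 hj2
    rcases hdom j hj1 hj2 with h | h
    · exact h
    · exact tbLe_trans hb h
  · rcases tbLe_total (tbKey a x) (tbKey a y) with h | hyx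
    · exact absurd h hb
    rw [if_neg hb]
    refine ⟨by omega, hy2, ?_⟩
    intro j hj1 hj2
    rcases hdom j hj1 hj2 with h | h
    · exact tbLe_trans hyx h
    · exact h

-- ---- A-side characterizations (pass1, pass2) ----
theorem tk_getLast?_mem {α : Type} {l : List α} {x : α} (h : l.getLast? = some x) : x ∈ l := by
  induction l with
  | nil => simp at h
  | cons a t ih =>
    rw [List.getLast?_cons] at h
    cases ht : t.getLast? with
    | none => rw [ht] at h; simp at h; simp [h]
    | some y => rw [ht] at h; simp at h; subst h; exact List.mem_cons_of_mem _ (ih ht)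

theorem tk_pass1_eq (a : List Int) (w : List Int) (m0 : Option Int) :
    w.foldl (tkStep1 a) m0 = ((w.filter (fun i => tkGet a i ≠ 0)).getLast?).or m0 := by
  induction w generalizing m0 with
  | nil => rfl
  | cons i t ih =>
    simp only [List.foldl_cons, List.filter_cons, tkStep1]
    by_cases h : tkGet a i ≠ 0
    · rw [if_pos h, ih (some i)]
      rw [if_pos (by simpa using h), List.getLast?_cons]
      cases ht : (t.filter (fun i => decide (tkGet a i ≠ 0))).getLast? with
      | none => simp
      | some y => simp
    · rw [if_neg h, ih m0]
      simp [h]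

theorem tk_pass2_stay (a : List Int) (w : List Int) (c : Int)
    (h : ∀ j ∈ w, ¬ (tkGet a j ≤ tkGet a c ∧ 0 < tkGet a j)) :
    w.foldl (tkStep2 a) c = c := by
  induction w with
  | nil => rfl
  | cons i t ih =>
    simp only [List.foldl_cons]
    have hi : tkStep2 a c i = c := by
      have := h i (by simp)
      simp only [tkStep2]
      rw [if_neg]; intro ⟨h1, h2⟩; exact this ⟨h1, h2⟩
    rw [hi]; exact ih (fun j hj => h j (List.mem_cons_of_mem _ hj))

theorem tk_foldl_min (l : List Int) : ∀ x y : Int, l.foldl min (min x y) = min x (l.foldl min y) := by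
  induction l with
  | nil => intro x y; rfl
  | cons z l ih =>
    intro x y
    simp only [List.foldl_cons]
    rw [min_assoc, ih]

theorem tk_max?_cons_ge (S : List Int) (i : Int) (hne : S ≠ []) (h : ∀ x ∈ S, i ≤ x) :
    PySem.List.max? (i :: S) (fun y => y) = PySem.List.max? S (fun y => y) := by
  cases S with
  | nil => exact absurd rfl hne
  | cons s0 S' =>
    rw [PySem.List.max?_id_cons, PySem.List.max?_id_cons]
    simp only [List.foldl_cons]
    rw [max_eq_right (h s0 (by simp))]

theorem tk_pass2_eq (a : List Int) (w : List Int) (hw : w.Pairwise (· < ·)) (m0 : Int) :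
    w.foldl (tkStep2 a) m0 =
      match PySem.List.min? ((w.filter (fun i => 0 < tkGet a i)).map (tkGet a)) (fun x => x) with
      | none => m0
      | some m =>
        if m ≤ tkGet a m0 then
          match PySem.List.max? (w.filter (fun i => tkGet a i = m)) (fun x => x) with
          | some r => r
          | none => -1
        else m0 := by
  induction w generalizing m0 with
  | nil => rfl
  | cons i t ih =>
    have hlt : ∀ x ∈ t, i < x := (List.pairwise_cons.mp hw).1
    have hp : t.Pairwise (· < ·) := (List.pairwise_cons.mp hw).2
    simp only [List.foldl_cons, List.filter_cons]
    by_cases hpi : 0 < tkGet a i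
    · -- head positive
      rw [if_pos (by simpa using hpi)]
      simp only [List.map_cons]
      rw [PySem.List.min?_id_cons]
      cases hrest : (t.filter (fun j => decide (0 < tkGet a j))).map (tkGet a) with
      | nil =>
        -- no positive entry in the tail
        have htpos : ∀ j ∈ t, ¬ 0 < tkGet a j := by
          intro j hj hcontra
          have : tkGet a j ∈ (t.filter (fun j => decide (0 < tkGet a j))).map (tkGet a) :=
            List.mem_map_of_mem (List.mem_filter.mpr ⟨hj, by simpa using hcontra⟩)
          rw [hrest] at this; simp at this
        have hstay : ∀ c : Int, t.foldl (tkStep2 a) c = c := by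
          intro c
          exact tk_pass2_stay a t c (fun j hj hc => htpos j hj hc.2)
        have hfil : t.filter (fun j => decide (tkGet a j = tkGet a i)) = [] := by
          rw [List.filter_eq_nil_iff]
          intro j hj
          simp only [decide_eq_true_eq]
          intro he; exact htpos j hj (he ▸ hpi)
        by_cases hle : tkGet a i ≤ tkGet a m0
        · have hstep : tkStep2 a m0 i = i := by simp [tkStep2, hle, hpi]
          rw [hstep, hstay]
          rw [show List.foldl min (tkGet a i) ([] : List Int) = tkGet a i from rfl]
          dsimp only
          rw [if_pos hle, if_pos (by simp), hfil, PySem.List.max?_id_cons]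
          rfl
        · have hstep : tkStep2 a m0 i = m0 := by
            simp only [tkStep2]; rw [if_neg]; intro hc; exact hle hc.1
          rw [hstep, hstay]
          simp only [List.foldl_nil]
          rw [if_neg hle]
      | cons r0 rs =>
        have hmin?t : PySem.List.min? ((t.filter (fun j => decide (0 < tkGet a j))).map (tkGet a)) (fun x => x)
            = some (rs.foldl min r0) := by rw [hrest, PySem.List.min?_id_cons]
        have hm' : (r0 :: rs).foldl min (tkGet a i) = min (tkGet a i) (rs.foldl min r0) := by
          simp only [List.foldl_cons]; rw [tk_foldl_min]
        set mt := rs.foldl min r0 with hmt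
        have hmt_mem : mt ∈ (t.filter (fun j => decide (0 < tkGet a j))).map (tkGet a) := by
          rw [hrest]
          rcases PySem.List.foldl_min_mem rs r0 with h | h
          · rw [hmt]; rw [h]; simp
          · exact List.mem_cons_of_mem _ h
        obtain ⟨j0, hj0f, hj0v⟩ := List.mem_map.mp hmt_mem
        have hj0t : j0 ∈ t := (List.mem_filter.mp hj0f).1
        have hj0pos : 0 < tkGet a j0 := by simpa using (List.mem_filter.mp hj0f).2
        have hmt_pos : 0 < mt := hj0v ▸ hj0pos
        have hmt_le : ∀ v ∈ (t.filter (fun j => decide (0 < tkGet a j))).map (tkGet a), mt ≤ v := by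
          rw [hrest]
          intro v hv
          rcases List.mem_cons.mp hv with h | h
          · rw [h, hmt]; exact (PySem.List.foldl_min_le rs r0).1
          · exact (PySem.List.foldl_min_le rs r0).2 v h
        have hmt_le' : ∀ j ∈ t, 0 < tkGet a j → mt ≤ tkGet a j := by
          intro j hj hjp
          exact hmt_le _ (List.mem_map_of_mem (List.mem_filter.mpr ⟨hj, by simpa using hjp⟩))
        rw [hm']
        by_cases hle : tkGet a i ≤ tkGet a m0
        · have hstep : tkStep2 a m0 i = i := by simp [tkStep2, hle, hpi]
          rw [hstep, ih hp i, hmin?t]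
          dsimp only
          by_cases hmtle : mt ≤ tkGet a i
          · rw [if_pos hmtle]
            have hminv : min (tkGet a i) mt = mt := min_eq_right hmtle
            rw [hminv, if_pos (le_trans hmtle hle)]
            by_cases heq : tkGet a i = mt
            · rw [if_pos (by simpa using heq)]
              have hSne : t.filter (fun j => decide (tkGet a j = mt)) ≠ [] := by
                intro hnil
                have : j0 ∈ t.filter (fun j => decide (tkGet a j = mt)) :=
                  List.mem_filter.mpr ⟨hj0t, by simpa using hj0v⟩
                rw [hnil] at this; simp at this
              rw [tk_max?_cons_ge _ i hSne]
              intro x hx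
              exact le_of_lt (hlt x (List.mem_filter.mp hx).1)
            · rw [if_neg (by simpa using heq)]
          · rw [if_neg hmtle]
            have hminv : min (tkGet a i) mt = tkGet a i := min_eq_left (by omega)
            rw [hminv, if_pos hle]
            have hfil : t.filter (fun j => decide (tkGet a j = tkGet a i)) = [] := by
              rw [List.filter_eq_nil_iff]
              intro j hj
              simp only [decide_eq_true_eq]
              intro he
              have := hmt_le' j hj (he ▸ hpi)
              omega
            rw [if_pos (by simp)]
            simp only [hfil]
            rw [PySem.List.max?_id_cons]
            rfl
        · have hstep : tkStep2 a m0 i = m0 := by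
            simp only [tkStep2]; rw [if_neg]; intro hc; exact hle hc.1
          rw [hstep, ih hp m0, hmin?t]
          dsimp only
          by_cases hmtle : mt ≤ tkGet a m0
          · rw [if_pos hmtle]
            have hminv : min (tkGet a i) mt = mt := min_eq_right (by omega)
            rw [hminv, if_pos hmtle]
            have hne : tkGet a i ≠ mt := by omega
            rw [if_neg (by simpa using hne)]
          · rw [if_neg hmtle]
            have : ¬ min (tkGet a i) mt ≤ tkGet a m0 := by omega
            rw [if_neg this]
    · -- head not positive: nothing changes
      have hstep : tkStep2 a m0 i = m0 := by
        simp only [tkStep2]; rw [if_neg]; intro hc; exact hpi hc.2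
      rw [hstep, ih hp m0]
      rw [if_neg (by simpa using hpi)]
      cases hm : PySem.List.min? ((t.filter (fun j => decide (0 < tkGet a j))).map (tkGet a)) (fun x => x) with
      | none => rfl
      | some m =>
        have hmpos : 0 < m := by
          have hmem := PySem.List.min?_mem hm
          obtain ⟨j, hjf, hjv⟩ := List.mem_map.mp hmem
          have := (List.mem_filter.mp hjf).2
          simp at this; omega
        have hd : decide (tkGet a i = m) = false := by
          simp only [decide_eq_false_iff_not]; omega
        dsimp only
        rw [hd]
        simp only [Bool.false_eq_true, if_false]

-- pass2 started at a positively-priced last-nonzero index lands on the best-ranked index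
theorem tk_pass2_isBest (a : List Int) (lo hi L : Int)
    (hL : ((PySem.List.pyRange lo (hi + 1) 1).filter (fun i => tkGet a i ≠ 0)).getLast? = some L)
    (hpos : 0 < tkGet a L) :
    tkIsBest a lo hi ((PySem.List.pyRange lo (hi + 1) 1).foldl (tkStep2 a) L) := by
  set w := PySem.List.pyRange lo (hi + 1) 1 with hwdef
  have hLf := tk_getLast?_mem hL
  have hLw : L ∈ w := (List.mem_filter.mp hLf).1
  have hLb := PySem.List.mem_pyRange_one.mp hLw
  rw [tk_pass2_eq a w (PySem.List.pairwise_lt_pyRange_one _ _) L]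
  have hLmap : tkGet a L ∈ (w.filter (fun i => 0 < tkGet a i)).map (tkGet a) :=
    List.mem_map_of_mem (List.mem_filter.mpr ⟨hLw, by simpa using hpos⟩)
  cases hm : PySem.List.min? ((w.filter (fun i => 0 < tkGet a i)).map (tkGet a)) (fun x => x) with
  | none =>
    exfalso
    have := (PySem.List.min?_eq_none_iff _ _).mp hm
    rw [this] at hLmap; simp at hLmap
  | some m =>
    have hmle : ∀ v ∈ (w.filter (fun i => 0 < tkGet a i)).map (tkGet a), m ≤ v := by
      intro v hv; simpa using PySem.List.min?_isMin hm v hv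
    have hmem := PySem.List.min?_mem hm
    obtain ⟨j0, hj0f, hj0v⟩ := List.mem_map.mp hmem
    have hj0w := (List.mem_filter.mp hj0f).1
    have hj0p : 0 < tkGet a j0 := by simpa using (List.mem_filter.mp hj0f).2
    have hmpos : 0 < m := hj0v ▸ hj0p
    dsimp only
    rw [if_pos (hmle _ hLmap)]
    cases hmax : PySem.List.max? (w.filter (fun i => tkGet a i = m)) (fun x => x) with
    | none =>
      exfalso
      have : j0 ∈ w.filter (fun i => tkGet a i = m) :=
        List.mem_filter.mpr ⟨hj0w, by simpa using hj0v⟩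
      rw [(PySem.List.max?_eq_none_iff _ _).mp hmax] at this
      simp at this
    | some r =>
      dsimp only
      have hrf := PySem.List.max?_mem hmax
      have hrw := (List.mem_filter.mp hrf).1
      have hrv : tkGet a r = m := by simpa using (List.mem_filter.mp hrf).2
      have hrb := PySem.List.mem_pyRange_one.mp hrw
      have hrmax : ∀ j ∈ w.filter (fun i => tkGet a i = m), j ≤ r := by
        intro j hj; simpa using PySem.List.max?_isMax hmax j hj
      refine ⟨by omega, by omega, ?_⟩
      intro j hj1 hj2
      have hjw : j ∈ w := PySem.List.mem_pyRange_one.mpr ⟨hj1, by omega⟩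
      by_cases hjp : 0 < tkGet a j
      · have hmj : m ≤ tkGet a j :=
          hmle _ (List.mem_map_of_mem (List.mem_filter.mpr ⟨hjw, by simpa using hjp⟩))
        by_cases heq : tkGet a j = m
        · have : j ≤ r := hrmax j (List.mem_filter.mpr ⟨hjw, by simpa using heq⟩)
          simp only [tbKey, if_pos hjp, if_pos (show tkGet a r > 0 by omega), tbLe]
          simp only [Bool.or_eq_true, Bool.and_eq_true, decide_eq_true_eq]
          refine Or.inr ⟨trivial, ?_⟩
          omega
        · simp only [tbKey, if_pos hjp, if_pos (show tkGet a r > 0 by omega), tbLe]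
          simp only [Bool.or_eq_true, Bool.and_eq_true, decide_eq_true_eq]
          refine Or.inr ⟨trivial, ?_⟩
          omega
      · simp only [tbKey, if_neg hjp, if_pos (show tkGet a r > 0 by omega), tbLe]
        simp only [Bool.or_eq_true, Bool.and_eq_true, decide_eq_true_eq]
        exact Or.inl (by norm_num)

-- pass2 started at a negatively-priced index stays there
theorem tk_pass2_neg (a : List Int) (lo hi L : Int) (hneg : tkGet a L < 0) :
    (PySem.List.pyRange lo (hi + 1) 1).foldl (tkStep2 a) L = L := by
  apply tk_pass2_stay
  intro j _ ⟨h1, h2⟩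
  omega

-- ---- B-side: prev correctness ----
theorem tkLNZ_split (a : List Int) (lo hi : Int) (h0 : 0 ≤ lo) :
    ((PySem.List.pyRange lo (hi + 1) 1).filter (fun j => tkGet a j ≠ 0)).getLast? =
      if (tkLNZ a hi).getD (-1) ≥ lo then some ((tkLNZ a hi).getD (-1)) else none := by
  by_cases hle : lo ≤ hi + 1
  · have hsplit : PySem.List.pyRange 0 (hi + 1) 1 =
        PySem.List.pyRange 0 lo 1 ++ PySem.List.pyRange lo (hi + 1) 1 :=
      PySem.List.pyRange_one_append 0 lo (hi + 1) h0 hle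
    unfold tkLNZ
    rw [hsplit, List.filter_append, List.getLast?_append]
    cases h2 : ((PySem.List.pyRange lo (hi + 1) 1).filter (fun j => tkGet a j ≠ 0)).getLast? with
    | some L2 =>
      have hm := tk_getLast?_mem h2
      have hb := PySem.List.mem_pyRange_one.mp (List.mem_filter.mp hm).1
      simp only [Option.some_or, Option.getD_some]
      rw [if_pos (by omega)]
    | none =>
      simp only [Option.none_or]
      cases h1 : ((PySem.List.pyRange 0 lo 1).filter (fun j => tkGet a j ≠ 0)).getLast? with
      | some L1 =>
        have hm := tk_getLast?_mem h1
        have hb := PySem.List.mem_pyRange_one.mp (List.mem_filter.mp hm).1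
        simp only [Option.getD_some]
        rw [if_neg (by omega)]
      | none =>
        simp only [Option.getD_none]
        rw [if_neg (by omega)]
  · rw [PySem.List.pyRange_one_eq_nil (by omega)]
    simp only [List.filter_nil, List.getLast?_nil]
    cases h1 : tkLNZ a hi with
    | some L =>
      have hm := tk_getLast?_mem h1
      have hb := PySem.List.mem_pyRange_one.mp (List.mem_filter.mp hm).1
      simp only [Option.getD_some]
      rw [if_neg (by omega)]
    | none =>
      simp only [Option.getD_none]
      rw [if_neg (by omega)]

theorem tbPrevAux_spec (a : List Int) (n : Int) : ∀ (N : Nat) (i last : Int) (acc : List Int),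
    (n - i).toNat = N → 0 ≤ i → acc.length = i.toNat →
    (∀ t : Int, 0 ≤ t → t < i → PySem.List.pyGetD acc t 0 = (tkLNZ a t).getD (-1)) →
    last = (tkLNZ a (i - 1)).getD (-1) →
    ∀ hi : Int, 0 ≤ hi → hi < n →
      PySem.List.pyGetD (tbPrevAux a n i last acc) hi 0 = (tkLNZ a hi).getD (-1) := by
  intro N
  induction N using Nat.strong_induction_on with
  | _ N IH =>
    intro i last acc hN h0i hlen hidx hlast hi h0hi hhin
    rw [tbPrevAux]
    by_cases hlt : i < n
    · rw [dif_pos hlt]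
      have hsucc : PySem.List.pyRange 0 (i + 1) 1 = PySem.List.pyRange 0 i 1 ++ [i] :=
        PySem.List.pyRange_one_succ_right h0i
      have hlast' : (if tkGet a i ≠ 0 then i else last) = (tkLNZ a i).getD (-1) := by
        unfold tkLNZ
        rw [hsucc, List.filter_append, List.getLast?_append]
        by_cases hz : tkGet a i ≠ 0
        · rw [if_pos hz]
          have hf : List.filter (fun j => decide (tkGet a j ≠ 0)) [i] = [i] := by simp [hz]
          rw [hf]
          simp only [List.getLast?_singleton, Option.some_or, Option.getD_some]
        · rw [if_neg hz]
          have hf : List.filter (fun j => decide (tkGet a j ≠ 0)) [i] = [] := by simp [hz]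
          rw [hf]
          simp only [List.getLast?_nil, Option.none_or]
          rw [hlast]
          unfold tkLNZ
          rw [show i - 1 + 1 = i by ring]
      refine IH ((n - (i + 1)).toNat) (by omega) (i + 1) _ _ rfl (by omega) ?_ ?_ ?_ hi h0hi hhin
      · simp only [List.length_append, List.length_cons, List.length_nil, hlen]
        omega
      · intro t h0t hti
        by_cases htlt : t < i
        · rw [PySem.List.pyGetD_eq_getElem _ _ (by omega) (by simp; omega),
              List.getElem_append_left (by omega)]
          rw [← PySem.List.pyGetD_eq_getElem _ _ h0t (by omega)]
          exact hidx t h0t htlt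
        · have hteq : t = i := by omega
          subst hteq
          rw [PySem.List.pyGetD_eq_getElem _ _ (by omega) (by simp; omega),
              List.getElem_append_right (by omega)]
          simp only [hlen]
          simpa using hlast'
      · rw [show i + 1 - 1 = i by ring]
        exact hlast'
    · rw [dif_neg hlt]
      exact hidx hi h0hi (by omega)

theorem tbPrev_spec (a : List Int) (n hi : Int) (h0 : 0 ≤ hi) (hn : hi < n) :
    PySem.List.pyGetD (tbPrev a n) hi 0 = (tkLNZ a hi).getD (-1) := by
  unfold tbPrev
  refine tbPrevAux_spec a n ((n : Int) - 0).toNat 0 (-1) [] rfl (by omega) rfl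
    (by intro t h1 h2; omega) ?_ hi h0 hn
  unfold tkLNZ
  rw [show (0 : Int) - 1 + 1 = 0 by ring, PySem.List.pyRange_one_eq_nil (by omega)]
  simp

-- ---- B-side: sparse-table correctness ----
theorem tkRowOk_one (a : List Int) (n : Int) : tkRowOk a n 1 (PySem.List.pyRange 0 n 1) := by
  intro i h0 hin
  have hlen : i < ((PySem.List.pyRange 0 n 1).length : Int) := by
    rw [PySem.List.length_pyRange_one]; omega
  rw [PySem.List.pyGetD_eq_getElem _ _ h0 hlen, PySem.List.getElem_pyRange_one]
  have hi' : (0 : Int) + (i.toNat : Int) = i := by omega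
  rw [hi']
  exact ⟨by omega, by omega, fun j h1 h2 => by
    have : j = i := by omega
    subst this; exact tbLe_refl _⟩

theorem tkRowOk_step (a : List Int) (n s : Int) (cur : List Int)
    (h : tkRowOk a n s cur) (h1 : 1 ≤ s) (_h2 : 2 * s ≤ n) :
    tkRowOk a n (2 * s) ((PySem.List.pyRange 0 (n - 2 * s + 1) 1).map
      (fun i => tbBetter a (PySem.List.pyGetD cur i 0) (PySem.List.pyGetD cur (i + s) 0))) := by
  intro i h0 hin
  rw [PySem.List.pyGetD_map_pyRange_of_nonneg _ _ _ _ h0 (by omega)]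
  have hb1 := h i h0 (by omega)
  have hb2 := h (i + s) (by omega) (by omega)
  rw [show i + s + s - 1 = i + 2 * s - 1 by ring] at hb2
  exact tbBetter_isBest hb1 hb2 (by omega) (by omega) (by omega)

theorem tbRowsAux_spec (a : List Int) (n : Int) : ∀ (N : Nat) (size : Int)
    (acc : List (List Int)) (cur : List Int),
    (n - size).toNat = N → 1 ≤ size → 1 ≤ acc.length → size = 2 ^ (acc.length - 1) →
    (∀ k : Nat, k < acc.length → tkRowOk a n (2 ^ k) (acc.getD k [])) →
    tkRowOk a n size cur →
    ∀ k : Nat, ((2 : Int) ^ k ≤ n ∨ k = 0) →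
      tkRowOk a n (2 ^ k) ((tbRowsAux a n size acc cur).getD k []) := by
  intro N
  induction N using Nat.strong_induction_on with
  | _ N IH =>
    intro size acc cur hN hs1 hlen1 hspow hprop hcur k hk
    rw [tbRowsAux]
    by_cases hcond : 2 * size ≤ n ∧ 1 ≤ size
    · rw [dif_pos hcond]
      have hnxt := tkRowOk_step a n size cur hcur hs1 hcond.1
      refine IH ((n - 2 * size).toNat) (by omega) (2 * size) _ _ rfl (by omega) ?_ ?_ ?_ hnxt k hk
      · simp
      · simp only [List.length_append, List.length_cons, List.length_nil]
        rw [hspow, ← pow_succ']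
        congr 1
        omega
      · intro k' hk'
        simp only [List.length_append, List.length_cons, List.length_nil] at hk'
        by_cases hlt : k' < acc.length
        · rw [List.getD_eq_getElem?_getD, List.getElem?_append_left hlt,
              ← List.getD_eq_getElem?_getD]
          exact hprop k' hlt
        · have hke : k' = acc.length := by omega
          subst hke
          rw [List.getD_eq_getElem?_getD, List.getElem?_append_right (by omega)]
          simp only [Nat.sub_self, List.getElem?_cons_zero, Option.getD_some]
          have : (2 : Int) ^ acc.length = 2 * size := by
            rw [hspow, ← pow_succ']
            congr 1
            omega
          rw [this]
          exact hnxt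
    · rw [dif_neg hcond]
      have hklt : k < acc.length := by
        rcases hk with hk | hk
        · by_contra hge
          have hge' : acc.length ≤ k := by omega
          have hmono : (2 : Int) ^ acc.length ≤ 2 ^ k :=
            pow_le_pow_right₀ (by norm_num) hge'
          have hbig : 2 * size = 2 ^ acc.length := by
            rw [hspow, ← pow_succ']
            congr 1
            omega
          omega
        · omega
      exact hprop k hklt

theorem tbRows_spec (a : List Int) (n : Int) (k : Nat) (hk : (2 ^ k : Int) ≤ n ∨ k = 0) :
    tkRowOk a n (2 ^ k) (PySem.List.pyGetD (tbRows a n) (k : Int) []) := by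
  unfold tbRows
  rw [PySem.List.pyGetD_natCast]
  refine tbRowsAux_spec a n ((n - 1).toNat) 1 [PySem.List.pyRange 0 n 1]
    (PySem.List.pyRange 0 n 1) rfl (by omega) (by simp) (by simp) ?_ (tkRowOk_one a n) k hk
  intro k' hk'
  simp only [List.length_cons, List.length_nil] at hk'
  have : k' = 0 := by omega
  subst this
  simpa using tkRowOk_one a n

theorem tbCheapest_isBest (a : List Int) (n lo hi : Int)
    (h0 : 0 ≤ lo) (h1 : lo ≤ hi) (h2 : hi ≤ n - 1) :
    tkIsBest a lo hi (tbCheapest a (tbRows a n) lo hi) := by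
  unfold tbCheapest
  set k : Nat := Nat.log2 (hi - lo + 1).toNat with hkdef
  have hlow : (2 : Int) ^ k ≤ hi - lo + 1 := by
    have h := Nat.log2_self_le (n := (hi - lo + 1).toNat) (by omega)
    have : ((2 ^ k : Nat) : Int) ≤ (((hi - lo + 1).toNat : Nat) : Int) := by exact_mod_cast h
    push_cast at this
    omega
  have hhigh : hi - lo + 1 < 2 * 2 ^ k := by
    have h := Nat.lt_log2_self (n := (hi - lo + 1).toNat)
    have : (((hi - lo + 1).toNat : Nat) : Int) < ((2 ^ (k + 1) : Nat) : Int) := by exact_mod_cast h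
    push_cast [pow_succ] at this
    omega
  have hrow := tbRows_spec a n k (Or.inl (by omega))
  have hb1 := hrow lo h0 (by omega)
  have hb2 := hrow (hi - 2 ^ k + 1) (by omega) (by omega)
  rw [show hi - 2 ^ k + 1 + 2 ^ k - 1 = hi by ring] at hb2
  exact tbBetter_isBest hb1 hb2 (by omega) (by omega) (by omega)

-- ---- the two selection routines agree ----
theorem tk_pick_eq (a : List Int) (n lo hi : Int)
    (h0 : 0 ≤ lo) (h1 : lo ≤ hi) (h2 : hi ≤ n - 1) :
    findMin a lo (hi - lo) = tbPick a (tbPrev a n) (tbRows a n) lo hi := by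
  unfold findMin tbPick
  dsimp only
  rw [show lo + (hi - lo) + 1 = hi + 1 by ring]
  rw [tk_pass1_eq, Option.or_none]
  rw [tbPrev_spec a n hi (by omega) (by omega)]
  rw [tkLNZ_split a lo hi (by omega)]
  set P := (tkLNZ a hi).getD (-1) with hPdef
  by_cases hPlo : P ≥ lo
  · rw [if_pos hPlo, if_neg (by omega)]
    have hLsome : ((PySem.List.pyRange lo (hi + 1) 1).filter
        (fun j => tkGet a j ≠ 0)).getLast? = some P := by
      rw [tkLNZ_split a lo hi (by omega), if_pos hPlo]
    have hPm := tk_getLast?_mem hLsome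
    have hPz : tkGet a P ≠ 0 := by simpa using (List.mem_filter.mp hPm).2
    by_cases hneg : tkGet a P < 0
    · rw [if_pos hneg]
      exact tk_pass2_neg a lo hi P hneg
    · rw [if_neg hneg]
      have hpos : 0 < tkGet a P := by omega
      exact tkIsBest_unique (tk_pass2_isBest a lo hi P hLsome hpos)
        (tbCheapest_isBest a n lo hi h0 h1 h2)
  · rw [if_neg hPlo, if_pos (by omega)]

-- pick returns -1 or an in-window index with nonzero value
theorem tk_pick_props (a : List Int) (n lo hi : Int)
    (h0 : 0 ≤ lo) (h1 : lo ≤ hi) (h2 : hi ≤ n - 1) :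
    tbPick a (tbPrev a n) (tbRows a n) lo hi = -1 ∨
      (lo ≤ tbPick a (tbPrev a n) (tbRows a n) lo hi ∧
       tbPick a (tbPrev a n) (tbRows a n) lo hi ≤ hi ∧
       tkGet a (tbPick a (tbPrev a n) (tbRows a n) lo hi) ≠ 0) := by
  unfold tbPick
  dsimp only
  rw [tbPrev_spec a n hi (by omega) (by omega)]
  set P := (tkLNZ a hi).getD (-1) with hPdef
  by_cases hPlo : P < lo
  · rw [if_pos hPlo]
    exact Or.inl rfl
  · rw [if_neg hPlo]
    have hLsome : ((PySem.List.pyRange lo (hi + 1) 1).filter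
        (fun j => tkGet a j ≠ 0)).getLast? = some P := by
      rw [tkLNZ_split a lo hi (by omega), if_pos (by omega)]
    have hPm := tk_getLast?_mem hLsome
    have hPz : tkGet a P ≠ 0 := by simpa using (List.mem_filter.mp hPm).2
    have hPb := PySem.List.mem_pyRange_one.mp (List.mem_filter.mp hPm).1
    by_cases hneg : tkGet a P < 0
    · rw [if_pos hneg]
      exact Or.inr ⟨by omega, by omega, hPz⟩
    · rw [if_neg hneg]
      have hpos : 0 < tkGet a P := by omega
      obtain ⟨hc1, hc2, hc3⟩ := tbCheapest_isBest a n lo hi h0 h1 h2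
      refine Or.inr ⟨hc1, hc2, ?_⟩
      have hdom := hc3 P (by omega) (by omega)
      by_cases hcz : 0 < tkGet a (tbCheapest a (tbRows a n) lo hi)
      · omega
      · exfalso
        simp only [tbKey, if_neg hcz, if_pos hpos, tbLe] at hdom
        simp only [Bool.or_eq_true, Bool.and_eq_true, decide_eq_true_eq] at hdom
        omega

-- if the window contains a nonzero index, pick does not return -1
theorem tk_pick_ne_neg_one (a : List Int) (n lo hi : Int)
    (h0 : 0 ≤ lo) (h1 : lo ≤ hi) (h2 : hi ≤ n - 1) (hnz : tkGet a lo ≠ 0) :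
    tbPick a (tbPrev a n) (tbRows a n) lo hi ≠ -1 := by
  unfold tbPick
  dsimp only
  rw [tbPrev_spec a n hi (by omega) (by omega)]
  set P := (tkLNZ a hi).getD (-1) with hPdef
  have hPlo : ¬ P < lo := by
    intro hPlo
    have hLnone : ((PySem.List.pyRange lo (hi + 1) 1).filter
        (fun j => tkGet a j ≠ 0)).getLast? = none := by
      rw [tkLNZ_split a lo hi (by omega), if_neg (by omega)]
    have : lo ∈ (PySem.List.pyRange lo (hi + 1) 1).filter (fun j => tkGet a j ≠ 0) :=
      List.mem_filter.mpr ⟨PySem.List.mem_pyRange_one.mpr ⟨le_refl _, by omega⟩, by simpa using hnz⟩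
    rw [List.getLast?_eq_none_iff.mp hLnone] at this
    simp at this
  rw [if_neg hPlo]
  have hLsome : ((PySem.List.pyRange lo (hi + 1) 1).filter
      (fun j => tkGet a j ≠ 0)).getLast? = some P := by
    rw [tkLNZ_split a lo hi (by omega), if_pos (by omega)]
  have hPm := tk_getLast?_mem hLsome
  have hPb := PySem.List.mem_pyRange_one.mp (List.mem_filter.mp hPm).1
  by_cases hneg : tkGet a P < 0
  · rw [if_pos hneg]
    omega
  · rw [if_neg hneg]
    obtain ⟨hc1, _, _⟩ := tbCheapest_isBest a n lo hi h0 h1 h2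
    omega

-- ---- the loops agree ----
theorem tk_loop_eq (a : List Int) (K n : Int) : ∀ (N : Nat) (index costs fuel : Int),
    (n - 1 - index - fuel).toNat = N → 0 ≤ index → 1 ≤ fuel → tkGet a index ≠ 0 →
    tankLoop a K n index costs fuel =
      tankAltLoop a (tbPrev a n) (tbRows a n) K n index costs fuel := by
  intro N
  induction N using Nat.strong_induction_on with
  | _ N IH =>
    intro index costs fuel hN h0 h1 hg
    rw [tankLoop, tankAltLoop]
    by_cases hidx : index = n - 1
    · rw [dif_neg (by simp [hidx]), dif_neg (by simp [hidx])]
    · by_cases hr : index + fuel ≥ n - 1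
      · rw [dif_pos ⟨hidx, by omega⟩, dif_pos hr, dif_neg (by omega)]
      · rw [dif_pos ⟨hidx, by omega⟩, dif_neg hr, dif_pos ⟨hidx, by omega⟩]
        dsimp only
        by_cases hK : fuel = K
        · rw [if_pos hK, if_pos hK]
          have hj : findMin a (index + 1) (fuel - 1) =
              tbPick a (tbPrev a n) (tbRows a n) (index + 1) (index + fuel) := by
            have h := tk_pick_eq a n (index + 1) (index + fuel) (by omega) (by omega) (by omega)
            rwa [show index + fuel - (index + 1) = fuel - 1 by ring] at h
          rw [hj]
          set j := tbPick a (tbPrev a n) (tbRows a n) (index + 1) (index + fuel) with hjdef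
          by_cases hjm : j = -1
          · rw [if_pos hjm, if_pos hjm]
          · rw [if_neg hjm, if_neg hjm]
            rcases tk_pick_props a n (index + 1) (index + fuel) (by omega) (by omega) (by omega)
              with he | ⟨hb1, hb2, hb3⟩
            · exact absurd he hjm
            · have := IH ((n - 1 - j - (fuel - (j - index) + 1)).toNat) (by omega)
                j (costs + tkGet a j) (fuel - (j - index) + 1) rfl (by omega) (by omega) hb3
              rw [this, show fuel - (j - index) + 1 = fuel + 1 - (j - index) by ring]
        · rw [if_neg hK, if_neg hK]
          have hj : findMin a index fuel =
              tbPick a (tbPrev a n) (tbRows a n) index (index + fuel) := by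
            have h := tk_pick_eq a n index (index + fuel) (by omega) (by omega) (by omega)
            rwa [show index + fuel - index = fuel by ring] at h
          rw [hj]
          set j := tbPick a (tbPrev a n) (tbRows a n) index (index + fuel) with hjdef
          have hjm : j ≠ -1 :=
            tk_pick_ne_neg_one a n index (index + fuel) (by omega) (by omega) (by omega) hg
          rw [if_neg hjm]
          rcases tk_pick_props a n index (index + fuel) (by omega) (by omega) (by omega)
            with he | ⟨hb1, hb2, hb3⟩
          · exact absurd he hjm
          · have := IH ((n - 1 - j - (fuel - (j - index) + 1)).toNat) (by omega)
              j (costs + tkGet a j) (fuel - (j - index) + 1) rfl (by omega) (by omega) hb3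
            rw [this, show fuel - (j - index) + 1 = fuel + 1 - (j - index) by ring]

-- ===== VERDICT (by name: the statement is the Claim_ definition above) =====
theorem tank_spec : Claim_equal_tank := by
  intro Array_ K _ _
  unfold Spec_tank tank tank_alt
  by_cases h : tkGet Array_ 0 > 0
  · have h2 : ¬ tkGet Array_ 0 ≤ 0 := by omega
    simp only [h, if_true, h2, if_false]
    exact tk_loop_eq Array_ K (Array_.length) ((Array_.length : Int) - 1 - 0 - 1).toNat 0
      (tkGet Array_ 0) 1 rfl (by omega) (by omega) (by omega)
  · have h2 : tkGet Array_ 0 ≤ 0 := by omega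
    simp [h, h2]
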